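-- pv_equiv track=rewrite | github.com/MIT-Emerging-Talent/ET6-practice-code-review | solutions/capitalize_character.py | capitalize_character
-- ===== SOURCE A (Python) =====
-- def capitalize_character(text: str, char_to_capitalize: str) -> str:
--     """
--     Capitalizes a specified character in a given string
--
--     Parameters:
--         text (str): The string in which the character will be capitalized.
--         char_to_capitalize (str): The character to capitalize. Must be a single character.
--
--     Returns:
--         str: The string with the specified character capitalized.
--
--     Raises:
--         AssertionError: If the first argument is not a string.
--         AssertionError: If the second argument is not a string.
--         AssertionError: If the second argument is not a single character.
--
--     Examples:
--         >>> capitalize_character('cat', 'a')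
--         'cAt'
--
--         >>> capitalize_character('hello', 'l')
--         'heLLo'
--
--         >>> capitalize_character('rose', 'a')
--         'rose'
--     """
--     assert isinstance(text, str), "Input should be a string."
--     assert isinstance(char_to_capitalize, str), "Input should be a string."
--     assert len(char_to_capitalize) == 1, (
--         "Character to capitalize must be a single character."
--     )
--
--     capitalized_text = ""
--
--     for char in text:
--         if char.lower() == char_to_capitalize.lower():
--             capitalized_text += char.upper()
--         else:
--             capitalized_text += char
--
--     return capitalized_text
-- ===== SOURCE B (Python) =====
-- def capitalize_character(text: str, char_to_capitalize: str) -> str: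
--     assert isinstance(text, str), "Input should be a string."
--     assert isinstance(char_to_capitalize, str), "Input should be a string."
--     assert len(char_to_capitalize) == 1, (
--         "Character to capitalize must be a single character."
--     )
--
--     up = char_to_capitalize.upper()
--     return up.join(text.split(char_to_capitalize.lower()))
-- ===== Notes on version B (the rewrite author's own statement) =====
-- stated objective: idiomatic
-- what changed: Replaces the per-character loop with its case-insensitive comparison and string concatenation by a split/join decomposition: split the text on the lowercase form of the character and join the pieces with its uppercase form (uppercase occurrences are already uppercase and stay in the pieces).
import Mathlib
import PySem

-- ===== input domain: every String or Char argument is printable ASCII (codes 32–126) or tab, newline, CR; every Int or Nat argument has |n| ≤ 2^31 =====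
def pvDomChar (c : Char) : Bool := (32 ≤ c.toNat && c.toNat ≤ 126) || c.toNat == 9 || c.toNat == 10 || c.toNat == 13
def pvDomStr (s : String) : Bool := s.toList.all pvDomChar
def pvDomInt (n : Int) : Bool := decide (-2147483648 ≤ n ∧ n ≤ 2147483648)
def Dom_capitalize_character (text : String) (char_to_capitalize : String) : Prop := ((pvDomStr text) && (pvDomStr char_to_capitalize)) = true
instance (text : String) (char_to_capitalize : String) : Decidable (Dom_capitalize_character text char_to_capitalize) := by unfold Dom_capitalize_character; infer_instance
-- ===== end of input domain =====

-- B replaces A's per-character case-insensitive comparison loop by a split/join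
-- decomposition: split on the character's lowercase form, join with its uppercase form.

-- ===== PORT A =====
-- the asserts always pass for str arguments except len(char_to_capitalize) == 1, which is Pre_
def capitalize_character (text : String) (char_to_capitalize : String) : String :=
  String.ofList (text.toList.foldl
    (fun acc c =>
      if PySem.Chars.lower [c] = PySem.Chars.lower char_to_capitalize.toList
      then acc ++ PySem.Chars.upper [c]
      else acc ++ [c]) [])

-- ===== PORT B =====
-- up = char_to_capitalize.upper(); up.join(text.split(char_to_capitalize.lower()))
def capitalize_character_alt (text : String) (char_to_capitalize : String) : String :=
  let up := PySem.Chars.upper char_to_capitalize.toList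
  String.ofList (PySem.Chars.join up
    (PySem.Chars.splitOn text.toList (PySem.Chars.lower char_to_capitalize.toList)))

-- ===== PRECONDITION & SPEC =====
-- Python A raises AssertionError unless char_to_capitalize has length 1
def Pre_capitalize_character (text : String) (char_to_capitalize : String) : Prop :=
  PySem.Str.len char_to_capitalize = 1
instance (text : String) (char_to_capitalize : String) : Decidable (Pre_capitalize_character text char_to_capitalize) := by unfold Pre_capitalize_character; infer_instance
def pvWitness_capitalize_character : String × String := ("cat", "a")

def Spec_capitalize_character (text : String) (char_to_capitalize : String) (out : String) : Prop := out = capitalize_character_alt text char_to_capitalize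
instance (text : String) (char_to_capitalize : String) (out : String) : Decidable (Spec_capitalize_character text char_to_capitalize out) := by unfold Spec_capitalize_character; infer_instance

-- ===== CLAIM =====
def Claim_equal_capitalize_character : Prop := ∀ (text : String) (char_to_capitalize : String), Dom_capitalize_character text char_to_capitalize → Pre_capitalize_character text char_to_capitalize → Spec_capitalize_character text char_to_capitalize (capitalize_character text char_to_capitalize)

-- ===== LEMMAS AND PROOFS =====

-- A's per-character step, as a pure function
def pvStep (t : Char) (c : Char) : List Char :=
  if PySem.Chars.lower [c] = PySem.Chars.lower [t] then PySem.Chars.upper [c] else [c]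

-- split on sep [l], with A's accumulator style (pieces in order, current piece reversed)
def pvSplit1 (l : Char) : List Char → List Char → List (List Char)
  | cur, [] => [cur.reverse]
  | cur, c :: rest =>
      if l = c then cur.reverse :: pvSplit1 l [] rest else pvSplit1 l (c :: cur) rest

lemma pv_eq_iff (c d : Char) : c = d ↔ c.toNat = d.toNat := by
  constructor
  · intro h; rw [h]
  · intro h
    rcases c with ⟨⟨⟨cv,hcv⟩⟩,_⟩; rcases d with ⟨⟨⟨dv,hdv⟩⟩,_⟩
    simp only [Char.toNat, UInt32.toNat] at h
    subst h; rfl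

lemma pv_toNat_ofNat (n : Nat) (h : n < 55296) : (Char.ofNat n).toNat = n := by
  simp only [Char.ofNat]
  rw [dif_pos (Or.inl h)]
  simp [Char.ofNatAux, Char.toNat]

lemma pv_isupper_iff (c : Char) : PySem.Chars.isupper c = true ↔ 65 ≤ c.toNat ∧ c.toNat ≤ 90 := by
  unfold PySem.Chars.isupper
  rw [Bool.and_eq_true, decide_eq_true_iff, decide_eq_true_iff,
      Char.le_def, Char.le_def, UInt32.le_iff_toNat_le, UInt32.le_iff_toNat_le]
  exact Iff.rfl

lemma pv_islower_iff (c : Char) : PySem.Chars.islower c = true ↔ 97 ≤ c.toNat ∧ c.toNat ≤ 122 := by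
  unfold PySem.Chars.islower
  rw [Bool.and_eq_true, decide_eq_true_iff, decide_eq_true_iff,
      Char.le_def, Char.le_def, UInt32.le_iff_toNat_le, UInt32.le_iff_toNat_le]
  exact Iff.rfl

lemma pv_toNat_lower (c : Char) :
    (PySem.Chars.lowerChar c).toNat = if 65 ≤ c.toNat ∧ c.toNat ≤ 90 then c.toNat + 32 else c.toNat := by
  unfold PySem.Chars.lowerChar
  by_cases h : PySem.Chars.isupper c = true
  · rw [if_pos h, if_pos ((pv_isupper_iff c).mp h)]
    have := (pv_isupper_iff c).mp h
    exact pv_toNat_ofNat _ (by omega)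
  · rw [if_neg h, if_neg (fun hh => h ((pv_isupper_iff c).mpr hh))]

lemma pv_toNat_upper (c : Char) :
    (PySem.Chars.upperChar c).toNat = if 97 ≤ c.toNat ∧ c.toNat ≤ 122 then c.toNat - 32 else c.toNat := by
  unfold PySem.Chars.upperChar
  by_cases h : PySem.Chars.islower c = true
  · rw [if_pos h, if_pos ((pv_islower_iff c).mp h)]
    have := (pv_islower_iff c).mp h
    exact pv_toNat_ofNat _ (by omega)
  · rw [if_neg h, if_neg (fun hh => h ((pv_islower_iff c).mpr hh))]

lemma pv_low_low (t : Char) : PySem.Chars.lowerChar (PySem.Chars.lowerChar t) = PySem.Chars.lowerChar t := by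
  rw [pv_eq_iff]; simp only [pv_toNat_lower]; split_ifs <;> omega

lemma pv_up_low (t : Char) : PySem.Chars.upperChar (PySem.Chars.lowerChar t) = PySem.Chars.upperChar t := by
  rw [pv_eq_iff]; simp only [pv_toNat_lower, pv_toNat_upper]; split_ifs <;> omega

lemma pv_up_up (t : Char) : PySem.Chars.upperChar (PySem.Chars.upperChar t) = PySem.Chars.upperChar t := by
  rw [pv_eq_iff]; simp only [pv_toNat_upper]; split_ifs <;> omega

lemma pv_low_inj (c t : Char) (h : PySem.Chars.lowerChar c = PySem.Chars.lowerChar t) :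
    c = PySem.Chars.lowerChar t ∨ c = PySem.Chars.upperChar t := by
  rw [pv_eq_iff] at h
  rw [pv_eq_iff c (PySem.Chars.lowerChar t), pv_eq_iff c (PySem.Chars.upperChar t)]
  simp only [pv_toNat_lower, pv_toNat_upper] at h ⊢
  split_ifs at h ⊢ <;> omega

-- B's per-character effect (split at lowerChar t, joined by [upperChar t]) matches A's step
lemma pv_point (t c : Char) :
    (if c = PySem.Chars.lowerChar t then [PySem.Chars.upperChar t] else [c]) = pvStep t c := by
  unfold pvStep
  simp only [PySem.Chars.lower, PySem.Chars.upper, List.map_cons, List.map_nil, List.cons.injEq, and_true]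
  by_cases h : c = PySem.Chars.lowerChar t
  · rw [if_pos h, if_pos (by rw [h]; exact pv_low_low t), h, pv_up_low]
  · rw [if_neg h]
    by_cases h2 : PySem.Chars.lowerChar c = PySem.Chars.lowerChar t
    · rcases pv_low_inj c t h2 with h3 | h3
      · exact absurd h3 h
      · rw [if_pos h2, h3, pv_up_up]
    · rw [if_neg h2]

-- A's fold accumulates exactly the flatMap of pvStep
lemma pv_loop (t : Char) :
    ∀ (l : List Char) (acc : List Char),
      l.foldl (fun acc c =>
          if PySem.Chars.lower [c] = PySem.Chars.lower [t]
          then acc ++ PySem.Chars.upper [c]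
          else acc ++ [c]) acc
        = acc ++ l.flatMap (pvStep t) := by
  intro l
  induction l with
  | nil => intro acc; simp
  | cons c l ih =>
    intro acc
    have hstep : (if PySem.Chars.lower [c] = PySem.Chars.lower [t]
        then acc ++ PySem.Chars.upper [c] else acc ++ [c]) = acc ++ pvStep t c := by
      unfold pvStep; split <;> rfl
    calc (c :: l).foldl _ acc
        = l.foldl _ (if PySem.Chars.lower [c] = PySem.Chars.lower [t]
            then acc ++ PySem.Chars.upper [c] else acc ++ [c]) := by rfl
      _ = (acc ++ pvStep t c) ++ l.flatMap (pvStep t) := by rw [hstep]; exact ih _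
      _ = acc ++ (c :: l).flatMap (pvStep t) := by
            rw [List.flatMap_cons, List.append_assoc]

lemma pvSplit1_ne_nil (l : Char) (cur cs : List Char) : pvSplit1 l cur cs ≠ [] := by
  induction cs generalizing cur with
  | nil => simp [pvSplit1]
  | cons c rest ih =>
    unfold pvSplit1
    split
    · simp
    · exact ih _

-- splitOn's fuelled worker, characterised for a single-character separator
lemma pv_go (l : Char) :
    ∀ (fuel : Nat) (cs cur : List Char) (acc : List (List Char)), cs.length < fuel →
      PySem.Chars.splitOn.go [l] fuel cs cur acc = acc.reverse ++ pvSplit1 l cur cs := by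
  intro fuel
  induction fuel with
  | zero => intro cs cur acc h; omega
  | succ f ih =>
    intro cs cur acc h
    cases cs with
    | nil => rw [PySem.Chars.splitOn.go.eq_def]; simp [pvSplit1]
    | cons c rest =>
      have hstep : PySem.Chars.splitOn.go [l] (f+1) (c :: rest) cur acc =
          (if [l].isPrefixOf (c :: rest) then PySem.Chars.splitOn.go [l] f rest [] (cur.reverse :: acc)
           else PySem.Chars.splitOn.go [l] f rest (c :: cur) acc) := by
        rw [PySem.Chars.splitOn.go.eq_def]; rfl
      rw [hstep]
      have hrest : rest.length < f := by simpa using Nat.lt_of_succ_lt_succ h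
      by_cases hc : l = c
      · rw [if_pos (by simp [List.isPrefixOf, hc]), ih rest [] (cur.reverse :: acc) hrest]
        simp [pvSplit1, hc]
      · rw [if_neg (by simp [List.isPrefixOf, hc]), ih rest (c :: cur) acc hrest]
        simp [pvSplit1, hc]

-- joining the split pieces with [upperChar t] is the flatMap of A's step
lemma pv_join (t : Char) (cur cs : List Char) :
    PySem.Chars.join [PySem.Chars.upperChar t] (pvSplit1 (PySem.Chars.lowerChar t) cur cs)
      = cur.reverse ++ cs.flatMap (pvStep t) := by
  induction cs generalizing cur with
  | nil => simp [pvSplit1, PySem.Chars.join, List.intercalate]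
  | cons c rest ih =>
    unfold pvSplit1
    by_cases hc : PySem.Chars.lowerChar t = c
    · rw [if_pos hc]
      obtain ⟨b, tl, hb⟩ : ∃ b tl, pvSplit1 (PySem.Chars.lowerChar t) [] rest = b :: tl := by
        cases hx : pvSplit1 (PySem.Chars.lowerChar t) [] rest with
        | nil => exact absurd hx (pvSplit1_ne_nil _ _ _)
        | cons b tl => exact ⟨b, tl, rfl⟩
      rw [hb, PySem.Chars.join_cons_cons, ← hb, ih]
      have hpt : pvStep t c = [PySem.Chars.upperChar t] := by
        rw [← pv_point t c, if_pos hc.symm]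
      simp [hpt]
    · rw [if_neg hc, ih]
      have hpt : pvStep t c = [c] := by
        rw [← pv_point t c, if_neg (fun h => hc h.symm)]
      simp [hpt]

-- ===== VERDICT =====
theorem capitalize_character_spec : Claim_equal_capitalize_character := by
  intro text s _hdom hpre
  unfold Spec_capitalize_character capitalize_character capitalize_character_alt
  have hlen : s.toList.length = 1 := by
    have := hpre
    unfold Pre_capitalize_character at this
    simpa [PySem.Str.len, PySem.Chars.len] using this
  obtain ⟨t, hts⟩ : ∃ t, s.toList = [t] := by
    cases h : s.toList with
    | nil => simp [h] at hlen
    | cons a l => cases l with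
      | nil => exact ⟨a, rfl⟩
      | cons b l' => simp [h] at hlen
  rw [hts]
  congr 1
  have hsplit : PySem.Chars.splitOn text.toList (PySem.Chars.lower [t])
      = pvSplit1 (PySem.Chars.lowerChar t) [] text.toList := by
    unfold PySem.Chars.splitOn
    rw [show PySem.Chars.lower [t] = [PySem.Chars.lowerChar t] from rfl]
    rw [pv_go (PySem.Chars.lowerChar t) (text.toList.length + 1) text.toList [] [] (by omega)]
    rfl
  rw [hsplit, show PySem.Chars.upper [t] = [PySem.Chars.upperChar t] from rfl,
      pv_join t [] text.toList, pv_loop t text.toList []]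
  simp
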